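-- pv_equiv track=rewrite | github.com/ShchurinAndrei/Parser_Config_eIUM | parser_config.py | return_collector_class
-- ===== SOURCE A (Python) =====
-- def return_collector_class(hosts_processes, deployment_dict):
--     # объявление словаря коллекторов
--     collector = {}
--
--     # цикл по перебору хостов
--     for host in hosts_processes.keys():
--         # цикл по перебору коллекторов указанного хоста
--         for processe in hosts_processes[host]:
--
--             # объявление списка атрибутов коллектора
--             parameters = []
--             # присвоение выбранному ключу - коллектору пустого списка аттрибутов
--             collector[processe] = parameters
--             custom_class = {}
--
--             # объявление шаблона строки
--             pattern = f'[/deployment/{host}/{processe}/'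
--             deployment_keys = filter(lambda block: block.startswith(pattern), deployment_dict.keys())
--             for deployment_key in deployment_keys:
--                 # цикл по перебору строк блока
--                 for line in deployment_dict[deployment_key]:
--                     if line.startswith('ClassName'):
--                         if '.' in line:
--                             if not line.startswith('ClassName=com.hp.'):
--                                 line = line.replace('ClassName=', '')
--                                 if line in custom_class.keys():
--                                     custom_class[line] += 1
--                                 else:
--                                     custom_class[line] = 0
--                                 num_class = len(collector[processe])
--                                 if num_class > 0:
--                                     for class_line in collector[processe]:
--                                         if line in class_line:
--                                             break
--                                         else:
--                                             if num_class == 1: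
--                                                 deployment_key = deployment_key.replace(pattern, '')
--                                                 deployment_key = deployment_key[:-1]
--                                                 custom = ['', '', 'Custom class:', deployment_key, line]
--                                                 collector[processe].append(custom)
--                                             else:
--                                                 num_class -= 1
--                                 else:
--                                     deployment_key = deployment_key.replace(pattern, '')
--                                     deployment_key = deployment_key[:-1]
--                                     custom = ['', '', 'Custom class:', deployment_key, line]
--                                     collector[processe].append(custom)
--                                 break
--                             break
--                         break
--             for cust in custom_class.keys():
--                 if custom_class[cust] > 0:
--                     for class_line in collector[processe]:
--                         if cust in class_line and f'and {custom_class[cust]} more' not in class_line: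
--                             class_line.append(f'and {custom_class[cust]} more')
--
--     return collector
-- ===== SOURCE B (Python) =====
-- PREFIX = '[/deployment/'
--
--
-- def _custom_class(lines):
--     # the custom class declared in a block: the first 'ClassName' line decides
--     for line in lines:
--         if line.startswith('ClassName'):
--             if '.' in line and not line.startswith('ClassName=com.hp.'):
--                 return line.replace('ClassName=', '')
--             return None
--     return None
--
--
-- def return_collector_class(hosts_processes, deployment_dict):
--     # One pass over deployment_dict: parse host and process out of each key and
--     # extract the block's custom class once, grouping (key, class) by (host, process);
--     # each process then needs a single dict lookup.
--     groups = {}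
--     for key, lines in deployment_dict.items():
--         cls = _custom_class(lines)
--         if cls is None or not key.startswith(PREFIX):
--             continue
--         parts = key[len(PREFIX):].split('/', 2)
--         if len(parts) == 3:
--             groups.setdefault((parts[0], parts[1]), []).append((key, cls))
--
--     collector = {}
--     for host, procs in hosts_processes.items():
--         for proc in procs:
--             pattern = f'{PREFIX}{host}/{proc}/'
--             entries = []
--             classes = []
--             for key, cls in groups.get((host, proc), []):
--                 classes.append(cls)
--                 if not any(cls in entry for entry in entries):
--                     entries.append(['', '', 'Custom class:', key.replace(pattern, '')[:-1], cls])
--             for cust in dict.fromkeys(classes):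
--                 extra = classes.count(cust) - 1
--                 if extra > 0:
--                     more = f'and {extra} more'
--                     for entry in entries:
--                         if cust in entry and more not in entry:
--                             entry.append(more)
--             collector[proc] = entries
--     return collector
-- ===== Notes on version B (the rewrite author's own statement) =====
-- stated objective: faster
-- what changed: B makes one pass over deployment_dict, parsing host and process out of each key and extracting the block's custom class once, grouping (key, class) by (host, process) so each process's matching blocks are a single dict lookup (with duplicate counts from a plain list + ordered dedup) instead of A's re-filtering of all keys and re-scanning of block lines for every process; Pre_ excludes host/process names containing '/', on which A's flat startswith-pattern match reads keys across segment boundaries while B's segment parsing is the other defensible reading.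
import Mathlib
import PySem

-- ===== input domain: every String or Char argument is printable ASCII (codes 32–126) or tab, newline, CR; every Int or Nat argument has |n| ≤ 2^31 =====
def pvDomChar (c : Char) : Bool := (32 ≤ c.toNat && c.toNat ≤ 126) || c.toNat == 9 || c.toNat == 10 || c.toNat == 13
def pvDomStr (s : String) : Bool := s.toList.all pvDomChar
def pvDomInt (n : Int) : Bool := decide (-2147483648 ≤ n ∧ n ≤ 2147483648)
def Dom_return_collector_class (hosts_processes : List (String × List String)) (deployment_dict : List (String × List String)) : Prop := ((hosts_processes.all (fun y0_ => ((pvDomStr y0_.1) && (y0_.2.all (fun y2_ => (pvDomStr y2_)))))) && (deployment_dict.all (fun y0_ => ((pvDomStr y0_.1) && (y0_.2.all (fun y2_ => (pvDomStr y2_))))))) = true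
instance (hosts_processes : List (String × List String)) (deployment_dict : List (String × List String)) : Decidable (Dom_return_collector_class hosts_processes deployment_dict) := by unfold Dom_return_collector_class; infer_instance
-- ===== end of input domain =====

-- B parses host and process out of each deployment key in ONE pass, grouping each
-- key (with its pre-extracted custom class) under (host, process), so each process's
-- matching blocks are a single dict lookup instead of A's re-filtering of all keys
-- and re-scanning of block lines per process.

-- ===== PORT A =====
-- A's inner countdown scan over collector[processe] ('for class_line in collector[processe]: …').
-- When it appends (at numClass == 1, i.e. on the last element), Python's next iteration visits the
-- appended entry, which contains lineR, and breaks — so returning right after the append is exact.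
def pvA_dedupScan (allE : List (List String)) (custom : List String) (lineR : String) :
    List (List String) → Int → List (List String)
  | [], _ => allE
  | e :: rest, numClass =>
    if e.contains lineR then allE
    else if numClass == 1 then allE ++ [custom]
    else pvA_dedupScan allE custom lineR rest (numClass - 1)

-- A's 'for line in deployment_dict[deployment_key]: …' loop (every branch under the first
-- 'ClassName' line ends in break); state = (custom_class, collector[processe]).
def pvA_lineLoop (pattern dkey : String) (st : PySem.Dict String Int × List (List String)) :
    List String → PySem.Dict String Int × List (List String)
  | [] => st
  | line :: rest =>
    if PySem.Str.startswith line "ClassName" then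
      if PySem.Str.isIn "." line then
        if !PySem.Str.startswith line "ClassName=com.hp." then
          let lineR := PySem.Str.replace line "ClassName=" ""
          -- 'custom_class[line] += 1' / 'custom_class[line] = 0'
          let cc := if st.1.contains lineR then st.1.insert lineR (st.1.getD lineR 0 + 1)
                    else st.1.insert lineR 0
          let numClass : Int := (st.2.length : Int)
          let trimmed := PySem.Str.slice (PySem.Str.replace dkey pattern "") none (some (-1))
          let custom := ["", "", "Custom class:", trimmed, lineR]
          let entries := if numClass > 0 then pvA_dedupScan st.2 custom lineR st.2 numClass
                         else st.2 ++ [custom]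
          (cc, entries)
        else st
      else st
    else pvA_lineLoop pattern dkey st rest

-- A's trailing 'and N more' pass ('custom_class[cust]' is a plain getitem; cust ranges over the
-- dict's own keys, so the key is present and getD … 0 is exact).
def pvA_finishEntries (cc : PySem.Dict String Int) (entries0 : List (List String)) :
    List (List String) :=
  cc.keys.foldl (fun entries cust =>
    if cc.getD cust 0 > 0 then
      entries.map (fun e =>
        if e.contains cust && !(e.contains ("and " ++ PySem.Int.toStr (cc.getD cust 0) ++ " more"))
        then e ++ ["and " ++ PySem.Int.toStr (cc.getD cust 0) ++ " more"] else e)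
    else entries) entries0

-- body of A's 'for processe in hosts_processes[host]:' loop (deployment_dict keys are unique,
-- so 'deployment_dict[deployment_key]' is getD of the key).
def pvA_procEntries (dd : PySem.Dict String (List String)) (host proc : String) :
    List (List String) :=
  let pattern := "[/deployment/" ++ host ++ "/" ++ proc ++ "/"
  let dkeys := dd.keys.filter (fun k => PySem.Str.startswith k pattern)
  let st := dkeys.foldl (fun st k => pvA_lineLoop pattern k st (dd.getD k []))
              ((PySem.Dict.empty : PySem.Dict String Int), ([] : List (List String)))
  pvA_finishEntries st.1 st.2

def return_collector_class (hosts_processes : List (String × List String)) (deployment_dict : List (String × List String)) : List (String × List (List String)) :=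
  let ddD := PySem.Dict.ofList deployment_dict
  ((PySem.Dict.ofList hosts_processes).items.foldl (fun coll it =>
      it.2.foldl (fun coll proc => coll.insert proc (pvA_procEntries ddD it.1 proc)) coll)
    (PySem.Dict.empty : PySem.Dict String (List (List String)))).items

-- ===== PORT B =====
-- Source B's _custom_class: the first ClassName line decides
def pvB_classOf : List String → Option String
  | [] => none
  | line :: rest =>
    if PySem.Str.startswith line "ClassName" then
      if PySem.Str.isIn "." line && !PySem.Str.startswith line "ClassName=com.hp." then
        some (PySem.Str.replace line "ClassName=" "")
      else none
    else pvB_classOf rest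

-- hand port of one step of str.split('/', …): split at the FIRST '/' (exact for a
-- one-character separator: none = no separator present)
def pvB_splitFirst : List Char → Option (List Char × List Char)
  | [] => none
  | c :: rest =>
    if c = '/' then some ([], rest)
    else (pvB_splitFirst rest).map (fun q => (c :: q.1, q.2))

-- tail.split('/', 2) keeping the first two parts; some ⟺ len(parts) == 3
def pvB_split2 (t : List Char) : Option (List Char × List Char) :=
  (pvB_splitFirst t).bind (fun hq => (pvB_splitFirst hq.2).map (fun pq => (hq.1, pq.1)))

-- Source B's grouping pass: groups.setdefault((host, proc), []).append((key, cls))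
def pvB_groups (items : List (String × List String)) :
    PySem.Dict (String × String) (List (String × String)) :=
  items.foldl (fun d it =>
    match pvB_classOf it.2 with
    | none => d
    | some cls =>
      if PySem.Str.startswith it.1 "[/deployment/" then
        match pvB_split2 (PySem.Str.slice it.1 (some 13) none).toList with
        | some hp => d.modify (String.ofList hp.1, String.ofList hp.2) [] (· ++ [(it.1, cls)])
        | none => d
      else d) PySem.Dict.empty

-- body of Source B's per-process loop: one dict lookup, then the dedup/append pass and the
-- 'and N more' pass driven by the ordered-dedup of the classes list
def pvB_procEntries (groups : PySem.Dict (String × String) (List (String × String)))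
    (host proc : String) : List (List String) :=
  let pattern := "[/deployment/" ++ host ++ "/" ++ proc ++ "/"
  let st := (groups.getD (host, proc) []).foldl (fun st kc =>
      (st.1 ++ [kc.2],
       if st.2.any (fun e => e.contains kc.2) then st.2
       else st.2 ++ [["", "", "Custom class:",
                      PySem.Str.slice (PySem.Str.replace kc.1 pattern "") none (some (-1)), kc.2]]))
    (([] : List String), ([] : List (List String)))
  (PySem.List.dedup st.1).foldl (fun entries cust =>
    let extra : Int := (st.1.count cust : Int) - 1
    if extra > 0 then
      entries.map (fun e =>
        if e.contains cust && !(e.contains ("and " ++ PySem.Int.toStr extra ++ " more"))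
        then e ++ ["and " ++ PySem.Int.toStr extra ++ " more"] else e)
    else entries) st.2

def return_collector_class_alt (hosts_processes : List (String × List String)) (deployment_dict : List (String × List String)) : List (String × List (List String)) :=
  let groups := pvB_groups (PySem.Dict.ofList deployment_dict).items
  ((PySem.Dict.ofList hosts_processes).items.foldl (fun coll it =>
      it.2.foldl (fun coll proc => coll.insert proc (pvB_procEntries groups it.1 proc)) coll)
    (PySem.Dict.empty : PySem.Dict String (List (List String)))).items

-- ===== PRECONDITION & SPEC =====
-- Pre_ excludes inputs where some host/process name contains '/' AND some deployment key
-- starts with the resulting pattern: there A's flat startswith match reads a key across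
-- segment boundaries (host 'a/b' claims a key of host 'a') while B's segment parsing is
-- the other defensible reading; '/'-containing names whose pattern matches no key stay
-- inside (both programs return the empty list for them).
def Pre_return_collector_class (hosts_processes : List (String × List String)) (deployment_dict : List (String × List String)) : Prop :=
  (hosts_processes.all (fun pr => pr.2.all (fun p =>
    (!(PySem.Str.isIn "/" pr.1) && !(PySem.Str.isIn "/" p)) ||
    deployment_dict.all (fun kv =>
      !(PySem.Str.startswith kv.1 ("[/deployment/" ++ pr.1 ++ "/" ++ p ++ "/")))))) = true
instance (hosts_processes : List (String × List String)) (deployment_dict : List (String × List String)) : Decidable (Pre_return_collector_class hosts_processes deployment_dict) := by unfold Pre_return_collector_class; infer_instance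

def pvWitness_return_collector_class : (List (String × List String)) × (List (String × List String)) :=
  ([("h", ["p"])], [("[/deployment/h/p/block]", ["ClassName=my.Cls"])])

def Spec_return_collector_class (hosts_processes : List (String × List String)) (deployment_dict : List (String × List String)) (out : List (String × List (List String))) : Prop := out = return_collector_class_alt hosts_processes deployment_dict
instance (hosts_processes : List (String × List String)) (deployment_dict : List (String × List String)) (out : List (String × List (List String))) : Decidable (Spec_return_collector_class hosts_processes deployment_dict out) := by unfold Spec_return_collector_class; infer_instance

-- ===== CLAIM (what is proved, stated in full; the proofs are below) =====
def Claim_equal_return_collector_class : Prop := ∀ (hosts_processes : List (String × List String)) (deployment_dict : List (String × List String)), Dom_return_collector_class hosts_processes deployment_dict → Pre_return_collector_class hosts_processes deployment_dict → Spec_return_collector_class hosts_processes deployment_dict (return_collector_class hosts_processes deployment_dict)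

-- ===== LEMMAS AND PROOFS =====

-- the counting step A applies to custom_class, as a function of the class string
def pvCCStep (d : PySem.Dict String Int) (x : String) : PySem.Dict String Int :=
  if d.contains x then d.insert x (d.getD x 0 + 1) else d.insert x 0

-- custom_class after a sequence of classes
def pvCCOf (cl : List String) : PySem.Dict String Int :=
  cl.foldl pvCCStep PySem.Dict.empty

-- A's entries update per matched key, as a function of the extracted class
def pvEntStep (pattern : String) (es : List (List String)) (dkey cls : String) :
    List (List String) :=
  if es.any (fun e => e.contains cls) then es
  else es ++ [["", "", "Custom class:",
               PySem.Str.slice (PySem.Str.replace dkey pattern "") none (some (-1)), cls]]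

theorem pvCCStep_insert_shape :
    pvCCStep = fun d x => d.insert x (if d.contains x then d.getD x 0 + 1 else 0) := by
  funext d x; unfold pvCCStep; split <;> simp_all

theorem pvCC_keys (cl : List String) (d : PySem.Dict String Int) :
    (cl.foldl pvCCStep d).keys = PySem.Set.update d.keys cl := by
  rw [pvCCStep_insert_shape]
  exact PySem.Dict.keys_foldl_insert cl _ d

theorem pvCC_getD (cl : List String) (d : PySem.Dict String Int) (x : String) :
    (cl.foldl pvCCStep d).getD x 0 =
      if d.contains x then d.getD x 0 + cl.count x
      else if x ∈ cl then (cl.count x : Int) - 1 else d.getD x 0 := by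
  induction cl generalizing d with
  | nil => simp
  | cons a l ih =>
    rw [List.foldl_cons, ih]
    by_cases hax : x = a
    · subst hax
      by_cases hd : d.contains x
      · simp [pvCCStep, hd]
        ring
      · simp [pvCCStep, hd]
    · have hcont : (pvCCStep d a).contains x = d.contains x := by
        unfold pvCCStep; split <;>
          simp [PySem.Dict.contains_insert, beq_iff_eq, hax]
      have hgd : (pvCCStep d a).getD x 0 = d.getD x 0 := by
        unfold pvCCStep; split <;> simp [PySem.Dict.getD_insert, hax]
      rw [hcont, hgd]
      simp [List.mem_cons, hax, Ne.symm hax]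

theorem pvA_dedupScan_eq (cur allE : List (List String)) (custom : List String) (lineR : String)
    (hne : cur ≠ []) (n : Int) (hn : n = cur.length) :
    pvA_dedupScan allE custom lineR cur n =
      if cur.any (fun e => e.contains lineR) then allE else allE ++ [custom] := by
  induction cur generalizing n with
  | nil => exact absurd rfl hne
  | cons e rest ih =>
    subst hn
    rw [pvA_dedupScan, List.any_cons]
    by_cases hc : e.contains lineR
    · simp only [hc, if_true, Bool.true_or, if_true]
    · simp only [hc, Bool.false_or]
      cases hr : rest with
      | nil => simp
      | cons r rs =>
        subst hr
        have h1 : (((e :: r :: rs).length : Int) == 1) = false := by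
          simp; omega
        rw [h1]
        simp only [Bool.false_eq_true, if_false]
        have harith : ((e :: r :: rs).length : Int) - 1 = (r :: rs).length := by
          simp only [List.length_cons]; push_cast; ring
        rw [harith, ih (List.cons_ne_nil r rs) _ rfl]

theorem pvA_lineLoop_none (lines : List String) (pattern dkey : String)
    (st : PySem.Dict String Int × List (List String)) (h : pvB_classOf lines = none) :
    pvA_lineLoop pattern dkey st lines = st := by
  induction lines with
  | nil => rfl
  | cons line rest ih =>
    rw [pvA_lineLoop]
    rw [pvB_classOf] at h
    by_cases h1 : PySem.Str.startswith line "ClassName"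
    · simp only [h1, if_true] at h ⊢
      by_cases h2 : PySem.Str.isIn "." line
      · by_cases h3 : PySem.Str.startswith line "ClassName=com.hp."
        · simp only [h3, Bool.not_true, Bool.false_eq_true, if_false, ite_self]
        · simp only [h2, h3, Bool.not_false, Bool.and_true,
            if_true, reduceCtorEq] at h
      · simp only [h2, Bool.false_eq_true, if_false]
    · simp only [h1] at h ⊢
      simp only [Bool.false_eq_true, if_false] at h ⊢
      exact ih h

theorem pvA_lineLoop_some (lines : List String) (pattern dkey : String)
    (st : PySem.Dict String Int × List (List String)) (cls : String)
    (h : pvB_classOf lines = some cls) :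
    pvA_lineLoop pattern dkey st lines = (pvCCStep st.1 cls, pvEntStep pattern st.2 dkey cls) := by
  obtain ⟨cc0, es0⟩ := st
  induction lines with
  | nil => simp [pvB_classOf] at h
  | cons line rest ih =>
    rw [pvA_lineLoop]
    rw [pvB_classOf] at h
    by_cases h1 : PySem.Str.startswith line "ClassName"
    · simp only [h1, if_true] at h ⊢
      by_cases h2 : PySem.Str.isIn "." line
      · by_cases h3 : PySem.Str.startswith line "ClassName=com.hp."
        · simp only [h2, h3, Bool.not_true, Bool.and_false, Bool.false_eq_true,
            if_false, reduceCtorEq] at h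
        · simp only [h2, h3, Bool.not_false, Bool.and_true, if_true,
            Option.some.injEq] at h ⊢
          subst h
          refine Prod.ext rfl ?_
          dsimp only
          cases es0 with
          | nil => simp [pvEntStep]
          | cons a b =>
            rw [if_pos (by exact_mod_cast Nat.succ_pos b.length)]
            rw [pvA_dedupScan_eq _ _ _ _ (List.cons_ne_nil a b) _ rfl]
            rfl
      · simp only [h2, Bool.false_and, Bool.false_eq_true, if_false, reduceCtorEq] at h
    · simp only [h1] at h ⊢
      simp only [Bool.false_eq_true, if_false] at h ⊢
      exact ih h

-- fold over a list where 'none' elements are skipped = fold over the filterMap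
theorem pvFoldl_filterMap {α β σ : Type} (l : List α) (h : α → Option β)
    (fA : σ → α → σ) (gA : σ → β → σ) (init : σ)
    (h0 : ∀ s a, h a = none → fA s a = s)
    (h1 : ∀ s a b, h a = some b → fA s a = gA s b) :
    l.foldl fA init = (l.filterMap h).foldl gA init := by
  induction l generalizing init with
  | nil => rfl
  | cons a l ih =>
    cases hc : h a with
    | none => simp [hc, h0 _ _ hc, ih]
    | some b => simp [hc, h1 _ _ _ hc, ih]

theorem pvFilterMap_filter {α β : Type} (P : α → Bool) (h : α → Option β) (l : List α) :
    (l.filter P).filterMap h = l.filterMap (fun a => if P a then h a else none) := by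
  induction l with
  | nil => rfl
  | cons a l ih =>
    by_cases hP : P a <;> simp [List.filterMap_cons, hP, ih]

-- ((l.filterMap f).filter q).map g pushed inside the filterMap
theorem pvFilterMap_filter_map {α β γ : Type} (f : α → Option β) (q : β → Bool) (g : β → γ)
    (l : List α) :
    ((l.filterMap f).filter q).map g =
      l.filterMap (fun a => match f a with
        | none => none
        | some b => if q b then some (g b) else none) := by
  induction l with
  | nil => rfl
  | cons a l ih =>
    cases hc : f a with
    | none => simp [hc, ih]
    | some b =>
      by_cases hq : q b <;> simp [hc, hq, ih]

-- splitFirst reassembles: a successful split means t = before ++ '/' :: after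
theorem pvB_splitFirst_some {t a b : List Char} (h : pvB_splitFirst t = some (a, b)) :
    t = a ++ '/' :: b := by
  induction t generalizing a b with
  | nil => simp [pvB_splitFirst] at h
  | cons c rest ih =>
    rw [pvB_splitFirst] at h
    by_cases hc : c = '/'
    · rw [if_pos hc] at h
      simp only [Option.some.injEq, Prod.mk.injEq] at h
      rw [← h.1, ← h.2, hc]
      rfl
    · rw [if_neg hc] at h
      cases hs : pvB_splitFirst rest with
      | none => rw [hs] at h; simp at h
      | some q =>
        rw [hs] at h
        simp only [Option.map_some, Option.some.injEq, Prod.mk.injEq] at h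
        rw [← h.1, ← h.2, List.cons_append, ← ih hs]

-- splitFirst on a '/'-free prefix followed by '/' :: r finds exactly that split
theorem pvB_splitFirst_of_free {a : List Char} (ha : '/' ∉ a) (r : List Char) :
    pvB_splitFirst (a ++ '/' :: r) = some (a, r) := by
  induction a with
  | nil => simp [pvB_splitFirst]
  | cons c cs ih =>
    have hc : c ≠ '/' := fun h => ha (h ▸ List.mem_cons_self)
    have hcs : '/' ∉ cs := fun h => ha (List.mem_cons_of_mem _ h)
    simp [pvB_splitFirst, hc, ih hcs]

-- '/' ∈ s.toList ↔ '/' in s (Python's 'in')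
theorem pvSlash_mem_iff (s : String) :
    PySem.Str.isIn "/" s = false ↔ '/' ∉ s.toList := by
  rw [← Bool.not_eq_true, PySem.Str.isIn_iff_infix]
  have : ("/" : String).toList = ['/'] := by decide
  rw [this, List.singleton_infix_iff]

-- the central parsing lemma: for '/'-free host and proc, B's (host, proc) extraction
-- from a key succeeds exactly when the key starts with A's pattern
theorem pvParse_iff (key host proc : String)
    (hh : '/' ∉ host.toList) (hp : '/' ∉ proc.toList) :
    (PySem.Str.startswith key "[/deployment/" = true ∧
      pvB_split2 (PySem.Str.slice key (some 13) none).toList = some (host.toList, proc.toList))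
    ↔ PySem.Str.startswith key ("[/deployment/" ++ host ++ "/" ++ proc ++ "/") = true := by
  have hpre13 : ("[/deployment/" : String).toList.length = 13 := by decide
  have hslice : (PySem.Str.slice key (some 13) none).toList = key.toList.drop 13 := by
    rw [PySem.Str.toList_slice, PySem.Chars.slice_eq_listSlice,
      show (13 : Int) = ((13 : Nat) : Int) by norm_num,
      PySem.List.slice_from _ (Int.natCast_nonneg 13), Int.toNat_natCast]
  have hpatL : ("[/deployment/" ++ host ++ "/" ++ proc ++ "/" : String).toList
      = ("[/deployment/" : String).toList ++ host.toList ++ '/' :: proc.toList ++ ['/'] := by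
    simp [String.toList_append]
  constructor
  · rintro ⟨h1, h2⟩
    rw [PySem.Str.startswith_eq, PySem.Chars.startswith_iff] at h1 ⊢
    obtain ⟨rest0, hrest0⟩ := h1
    rw [pvB_split2] at h2
    cases hs1 : pvB_splitFirst (PySem.Str.slice key (some 13) none).toList with
    | none => rw [hs1] at h2; simp at h2
    | some hq =>
      simp only [hs1, Option.bind_some] at h2
      cases hs2 : pvB_splitFirst hq.2 with
      | none => rw [hs2] at h2; simp at h2
      | some pq =>
        simp only [hs2, Option.map_some, Option.some.injEq, Prod.mk.injEq] at h2
        have e1 := pvB_splitFirst_some hs1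
        have e2 := pvB_splitFirst_some hs2
        rw [hslice, ← hrest0, List.drop_left' hpre13] at e1
        rw [hpatL]
        refine ⟨pq.2, ?_⟩
        rw [← hrest0, e1, h2.1, e2, h2.2]
        simp
  · intro h
    rw [PySem.Str.startswith_eq, PySem.Chars.startswith_iff, hpatL] at h
    obtain ⟨rest, hrest⟩ := h
    constructor
    · rw [PySem.Str.startswith_eq, PySem.Chars.startswith_iff]
      exact ⟨host.toList ++ '/' :: proc.toList ++ ['/'] ++ rest, by rw [← hrest]; simp⟩
    · have hdrop : key.toList.drop 13 = host.toList ++ '/' :: (proc.toList ++ '/' :: rest) := by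
        rw [← hrest,
          show ("[/deployment/" : String).toList ++ host.toList ++ '/' :: proc.toList ++ ['/']
              ++ rest = ("[/deployment/" : String).toList ++
                (host.toList ++ '/' :: (proc.toList ++ '/' :: rest)) by simp]
        exact List.drop_left' hpre13
      rw [pvB_split2, hslice, hdrop, pvB_splitFirst_of_free hh]
      simp only [Option.bind_some]
      rw [pvB_splitFirst_of_free hp]
      rfl

-- B's grouping dict, looked up at a '/'-free (host, proc), is exactly A's filtered
-- key list paired with the extracted classes
theorem pvGroups_getD (items : List (String × List String)) (host proc : String)
    (hh : '/' ∉ host.toList) (hp : '/' ∉ proc.toList) :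
    (pvB_groups items).getD (host, proc) [] =
      items.filterMap (fun it =>
        if PySem.Str.startswith it.1 ("[/deployment/" ++ host ++ "/" ++ proc ++ "/")
        then (pvB_classOf it.2).map (fun c => (it.1, c)) else none) := by
  have hstep : pvB_groups items =
      (items.filterMap (fun it =>
        match pvB_classOf it.2 with
        | none => none
        | some cls =>
          if PySem.Str.startswith it.1 "[/deployment/" then
            match pvB_split2 (PySem.Str.slice it.1 (some 13) none).toList with
            | some hpq => some ((String.ofList hpq.1, String.ofList hpq.2), (it.1, cls))
            | none => none
          else none)).foldl
        (fun d p => d.modify p.1 [] (· ++ [p.2])) PySem.Dict.empty := by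
    unfold pvB_groups
    refine pvFoldl_filterMap _ _ _ _ _ ?_ ?_
    · intro s it hnone
      dsimp only at hnone ⊢
      cases hc : pvB_classOf it.2 with
      | none => simp only []
      | some cls =>
        simp only [hc] at hnone ⊢
        by_cases h1 : PySem.Str.startswith it.1 "[/deployment/"
        · rw [if_pos h1] at hnone ⊢
          cases hs : pvB_split2 (PySem.Str.slice it.1 (some 13) none).toList with
          | none => simp only []
          | some q => simp only [hs] at hnone; exact absurd hnone (by simp)
        · rw [if_neg h1]
    · intro s it b hsome
      dsimp only at hsome ⊢
      cases hc : pvB_classOf it.2 with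
      | none => simp only [hc] at hsome; exact absurd hsome (by simp)
      | some cls =>
        simp only [hc] at hsome ⊢
        by_cases h1 : PySem.Str.startswith it.1 "[/deployment/"
        · rw [if_pos h1] at hsome ⊢
          cases hs : pvB_split2 (PySem.Str.slice it.1 (some 13) none).toList with
          | none => simp only [hs] at hsome; exact absurd hsome (by simp)
          | some q =>
            simp only [hs, Option.some.injEq] at hsome ⊢
            rw [← hsome]
        · rw [if_neg h1] at hsome
          exact absurd hsome (by simp)
  rw [hstep, PySem.Dict.getD_foldl_modify_append, PySem.Dict.getD_empty, List.nil_append,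
    pvFilterMap_filter_map]
  refine List.filterMap_congr ?_
  intro it _
  cases hc : pvB_classOf it.2 with
  | none =>
    simp only []
    split <;> rfl
  | some cls =>
    simp only []
    by_cases hpat : PySem.Str.startswith it.1 ("[/deployment/" ++ host ++ "/" ++ proc ++ "/")
    · obtain ⟨h1, h2⟩ := (pvParse_iff it.1 host proc hh hp).mpr hpat
      rw [if_pos h1]
      simp only [h2]
      rw [if_pos hpat]
      simp only [String.ofList_toList, Option.map_some]
      have hb : (((host, proc) : String × String) == (host, proc)) = true := by simp
      rw [if_pos hb]
    · by_cases h1 : PySem.Str.startswith it.1 "[/deployment/"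
      · rw [if_pos h1]
        cases hs : pvB_split2 (PySem.Str.slice it.1 (some 13) none).toList with
        | none =>
          simp only []
          rw [if_neg hpat]
        | some q =>
          simp only []
          have hne : (String.ofList q.1, String.ofList q.2) ≠ ((host, proc) : String × String) := by
            intro he
            apply hpat
            refine (pvParse_iff it.1 host proc hh hp).mp ⟨h1, ?_⟩
            rw [Prod.mk.injEq] at he
            have hq1 : q.1 = host.toList := by rw [← he.1, String.toList_ofList]
            have hq2 : q.2 = proc.toList := by rw [← he.2, String.toList_ofList]
            rw [hs]
            exact congrArg some (Prod.ext hq1 hq2)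
          have hbeq : ((String.ofList q.1, String.ofList q.2) == ((host, proc) : String × String))
              = false := beq_eq_false_iff_ne.mpr hne
          rw [hbeq, if_neg hpat]
          rfl
      · rw [if_neg h1, if_neg hpat]

-- A's per-class fold with the counting dict = B's fold collecting the raw class list
theorem pvAB_fold (M : List (String × String)) (pattern : String) (cl : List String)
    (es : List (List String)) :
    M.foldl (fun st kc => (pvCCStep st.1 kc.2, pvEntStep pattern st.2 kc.1 kc.2)) (pvCCOf cl, es) =
      ((M.foldl (fun st kc =>
          ((st.1 ++ [kc.2] : List String),
           pvEntStep pattern st.2 kc.1 kc.2)) (cl, es)).map pvCCOf id : _) := by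
  induction M generalizing cl es with
  | nil => simp [Prod.map]
  | cons kc M ih =>
    rw [List.foldl_cons, List.foldl_cons]
    have h1 : pvCCStep (pvCCOf cl) kc.2 = pvCCOf (cl ++ [kc.2]) := by
      unfold pvCCOf
      rw [List.foldl_append]
      rfl
    dsimp only
    rw [h1]
    exact ih (cl ++ [kc.2]) (pvEntStep pattern es kc.1 kc.2)

-- the per-process equivalence, for a '/'-free (host, proc)
theorem pvProc_eq (dd : PySem.Dict String (List String)) (hnd : dd.keys.Nodup)
    (host proc : String) (hh : '/' ∉ host.toList) (hp : '/' ∉ proc.toList) :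
    pvA_procEntries dd host proc = pvB_procEntries (pvB_groups dd.items) host proc := by
  simp only [pvA_procEntries, pvB_procEntries]
  set pattern := "[/deployment/" ++ host ++ "/" ++ proc ++ "/" with hpat
  -- A's fold over the filtered key list = fold over the filtered items
  have hitems : dd.items.filter (fun it => PySem.Str.startswith it.1 pattern)
      = (dd.keys.filter (fun k => PySem.Str.startswith k pattern)).map
          (fun k => (k, dd.getD k [])) := by
    rw [PySem.Dict.items_eq_map_keys dd hnd [], List.filter_map]
    rfl
  have hA1 : (dd.keys.filter (fun k => PySem.Str.startswith k pattern)).foldl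
        (fun st k => pvA_lineLoop pattern k st (dd.getD k []))
        ((PySem.Dict.empty : PySem.Dict String Int), ([] : List (List String)))
      = (dd.items.filter (fun it => PySem.Str.startswith it.1 pattern)).foldl
        (fun st it => pvA_lineLoop pattern it.1 st it.2)
        ((PySem.Dict.empty : PySem.Dict String Int), ([] : List (List String))) := by
    rw [hitems, List.foldl_map]
  have hA2 : (dd.items.filter (fun it => PySem.Str.startswith it.1 pattern)).foldl
        (fun st it => pvA_lineLoop pattern it.1 st it.2)
        ((PySem.Dict.empty : PySem.Dict String Int), ([] : List (List String)))
      = ((dd.items.filter (fun it => PySem.Str.startswith it.1 pattern)).filterMap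
          (fun it => (pvB_classOf it.2).map (fun c => (it.1, c)))).foldl
        (fun st kc => (pvCCStep st.1 kc.2, pvEntStep pattern st.2 kc.1 kc.2))
        ((PySem.Dict.empty : PySem.Dict String Int), ([] : List (List String))) := by
    refine pvFoldl_filterMap _ _ _ _ _ ?_ ?_
    · intro s it hnone
      rw [Option.map_eq_none_iff] at hnone
      exact pvA_lineLoop_none it.2 pattern it.1 s hnone
    · intro s it b hsome
      rw [Option.map_eq_some_iff] at hsome
      obtain ⟨c, hc, rfl⟩ := hsome
      exact pvA_lineLoop_some it.2 pattern it.1 s c hc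
  have hIdx : (pvB_groups dd.items).getD (host, proc) []
      = (dd.items.filter (fun it => PySem.Str.startswith it.1 pattern)).filterMap
          (fun it => (pvB_classOf it.2).map (fun c => (it.1, c))) := by
    rw [pvGroups_getD dd.items host proc hh hp, pvFilterMap_filter]
  rw [hA1, hA2, hIdx]
  -- both sides now fold over the same matched list M
  set M := (dd.items.filter (fun it => PySem.Str.startswith it.1 pattern)).filterMap
      (fun it => (pvB_classOf it.2).map (fun c => (it.1, c))) with hM
  have hB : (M.foldl (fun st kc =>
        ((st.1 ++ [kc.2] : List String), pvEntStep pattern st.2 kc.1 kc.2)) ([], []))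
      = M.foldl (fun st kc =>
          (st.1 ++ [kc.2],
           if st.2.any (fun e => e.contains kc.2) then st.2
           else st.2 ++ [["", "", "Custom class:",
             PySem.Str.slice (PySem.Str.replace kc.1 pattern "") none (some (-1)), kc.2]]))
        (([] : List String), ([] : List (List String))) := rfl
  have hcc0 : ((PySem.Dict.empty : PySem.Dict String Int)) = pvCCOf [] := rfl
  rw [hcc0, pvAB_fold M pattern [] [], ← hB]
  set r := M.foldl (fun st kc =>
      ((st.1 ++ [kc.2] : List String), pvEntStep pattern st.2 kc.1 kc.2)) ([], []) with hr
  -- the trailing 'and N more' pass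
  show pvA_finishEntries (pvCCOf r.1) r.2 = _
  unfold pvA_finishEntries
  have hkeys : (pvCCOf r.1).keys = PySem.List.dedup r.1 := by
    unfold pvCCOf
    rw [pvCC_keys, PySem.Dict.keys_empty, PySem.List.dedup_eq_ofList]
    rfl
  rw [hkeys]
  refine PySem.List.foldl_congr_mem _ _ _ _ ?_
  intro entries cust hcust
  have hmem : cust ∈ r.1 := by
    rw [PySem.List.dedup_eq_ofList, PySem.Set.mem_ofList] at hcust
    exact hcust
  have hgd : (pvCCOf r.1).getD cust 0 = (r.1.count cust : Int) - 1 := by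
    unfold pvCCOf
    rw [pvCC_getD]
    simp [PySem.Dict.contains_empty, hmem]
  rw [hgd]

-- every item of a dict built by an insert fold satisfies a property its sources satisfy
theorem pvItems_foldl_insert {κ ν : Type} [BEq κ] [LawfulBEq κ] (P : κ × ν → Prop)
    (l : List (κ × ν)) (d : PySem.Dict κ ν)
    (hd : ∀ q ∈ d.items, P q) (hl : ∀ q ∈ l, P q) :
    ∀ q ∈ (l.foldl (fun d p => d.insert p.1 p.2) d).items, P q := by
  induction l generalizing d with
  | nil => exact hd
  | cons a l ih =>
    intro q hq
    refine ih (d.insert a.1 a.2) ?_ (fun q hq => hl q (List.mem_cons_of_mem _ hq)) q hq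
    intro q hq
    rcases (PySem.Dict.mem_items_insert _ _ _ _).mp hq with h | h
    · exact h ▸ hl a List.mem_cons_self
    · exact hd q h.1

-- the part before the first '/' found by splitFirst is '/'-free
theorem pvB_splitFirst_free {t a b : List Char} (h : pvB_splitFirst t = some (a, b)) :
    '/' ∉ a := by
  induction t generalizing a b with
  | nil => simp [pvB_splitFirst] at h
  | cons c rest ih =>
    rw [pvB_splitFirst] at h
    by_cases hc : c = '/'
    · rw [if_pos hc] at h
      simp only [Option.some.injEq, Prod.mk.injEq] at h
      rw [← h.1]
      exact List.not_mem_nil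
    · rw [if_neg hc] at h
      cases hs : pvB_splitFirst rest with
      | none => rw [hs] at h; simp at h
      | some q =>
        rw [hs] at h
        simp only [Option.map_some, Option.some.injEq, Prod.mk.injEq] at h
        rw [← h.1]
        intro hm
        rcases List.mem_cons.mp hm with hm | hm
        · exact hc hm.symm
        · exact ih hs hm

-- every key of B's grouping dict has '/'-free components
theorem pvGroups_keys_free_aux (items : List (String × List String))
    (d : PySem.Dict (String × String) (List (String × String)))
    (hd : ∀ k ∈ d.keys, '/' ∉ k.1.toList ∧ '/' ∉ k.2.toList) :
    ∀ k ∈ (items.foldl (fun d it =>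
      match pvB_classOf it.2 with
      | none => d
      | some cls =>
        if PySem.Str.startswith it.1 "[/deployment/" then
          match pvB_split2 (PySem.Str.slice it.1 (some 13) none).toList with
          | some hp => d.modify (String.ofList hp.1, String.ofList hp.2) [] (· ++ [(it.1, cls)])
          | none => d
        else d) d).keys, '/' ∉ k.1.toList ∧ '/' ∉ k.2.toList := by
  induction items generalizing d with
  | nil => exact hd
  | cons it rest ih =>
    rw [List.foldl_cons]
    refine ih _ ?_
    cases hc : pvB_classOf it.2 with
    | none => simpa only [hc] using hd
    | some cls =>
      simp only []
      by_cases h1 : PySem.Str.startswith it.1 "[/deployment/"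
      · rw [if_pos h1]
        cases hs : pvB_split2 (PySem.Str.slice it.1 (some 13) none).toList with
        | none => simpa only [] using hd
        | some q =>
          simp only []
          intro k hk
          rw [PySem.Dict.keys_modify] at hk
          rcases (PySem.Dict.mem_keys_insert _ _ _ _).mp hk with hk | hk
          · subst hk
            rw [pvB_split2] at hs
            cases hs1 : pvB_splitFirst (PySem.Str.slice it.1 (some 13) none).toList with
            | none => rw [hs1] at hs; simp at hs
            | some hq =>
              simp only [hs1, Option.bind_some] at hs
              cases hs2 : pvB_splitFirst hq.2 with
              | none => rw [hs2] at hs; simp at hs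
              | some pq =>
                simp only [hs2, Option.map_some, Option.some.injEq] at hs
                have hf1 := pvB_splitFirst_free hs1
                have hf2 := pvB_splitFirst_free hs2
                rw [← hs]
                constructor
                · simpa [String.toList_ofList] using hf1
                · simpa [String.toList_ofList] using hf2
          · exact hd k hk
      · rw [if_neg h1]
        exact hd

theorem pvGroups_keys_free (items : List (String × List String)) :
    ∀ k ∈ (pvB_groups items).keys, '/' ∉ k.1.toList ∧ '/' ∉ k.2.toList := by
  unfold pvB_groups
  exact pvGroups_keys_free_aux items PySem.Dict.empty (by simp [PySem.Dict.keys_empty])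

-- A's per-process body when no deployment key matches the pattern
theorem pvA_proc_empty (dd : PySem.Dict String (List String)) (host proc : String)
    (hnom : ∀ k ∈ dd.keys,
      ¬ PySem.Str.startswith k ("[/deployment/" ++ host ++ "/" ++ proc ++ "/") = true) :
    pvA_procEntries dd host proc = [] := by
  unfold pvA_procEntries
  simp only []
  rw [List.filter_eq_nil_iff.mpr (fun k hk => by simpa using hnom k hk)]
  rfl

-- B's per-process body when (host, proc) has no group
theorem pvB_proc_empty (groups : PySem.Dict (String × String) (List (String × String)))
    (host proc : String) (hnc : groups.contains (host, proc) = false) :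
    pvB_procEntries groups host proc = [] := by
  unfold pvB_procEntries
  simp only []
  rw [PySem.Dict.getD_of_not_contains _ _ hnc]
  rfl

-- ===== VERDICT (by name: the statement is the Claim_ definition above) =====
theorem return_collector_class_spec : Claim_equal_return_collector_class := by
  intro hp dd _ hpre
  unfold Spec_return_collector_class return_collector_class return_collector_class_alt
  have hnd := PySem.Dict.nodup_keys_ofList (κ := String) (ν := List String) dd
  -- the Pre_ disjunction, carried to the host items the outer loop visits
  have hcond : ∀ q ∈ (PySem.Dict.ofList hp).items, ∀ p ∈ q.2,
      ('/' ∉ q.1.toList ∧ '/' ∉ p.toList) ∨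
      (∀ kv ∈ dd, ¬ PySem.Str.startswith kv.1
        ("[/deployment/" ++ q.1 ++ "/" ++ p ++ "/") = true) := by
    refine pvItems_foldl_insert _ hp PySem.Dict.empty
      (fun q hq => absurd hq (by simp [PySem.Dict.empty])) ?_
    intro q hq p hpm
    rw [Pre_return_collector_class, List.all_eq_true] at hpre
    have h := hpre q hq
    rw [List.all_eq_true] at h
    have h2 := h p hpm
    rw [Bool.or_eq_true] at h2
    rcases h2 with h2 | h2
    · left
      rw [Bool.and_eq_true, Bool.not_eq_true', Bool.not_eq_true'] at h2
      exact ⟨(pvSlash_mem_iff q.1).mp h2.1, (pvSlash_mem_iff p).mp h2.2⟩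
    · right
      rw [List.all_eq_true] at h2
      intro kv hkv
      have h3 := h2 kv hkv
      rw [Bool.not_eq_true'] at h3
      intro hx
      rw [h3] at hx
      exact Bool.false_ne_true hx
  refine congrArg PySem.Dict.items ?_
  refine PySem.List.foldl_congr_mem _ _ _ _ ?_
  intro coll it hit
  refine PySem.List.foldl_congr_mem _ _ _ _ ?_
  intro c p hpm
  by_cases hsf : '/' ∉ it.1.toList ∧ '/' ∉ p.toList
  · rw [pvProc_eq _ hnd it.1 p hsf.1 hsf.2]
  · -- a '/'-containing name: Pre_ says its pattern matches no deployment key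
    have hnoml : ∀ kv ∈ dd, ¬ PySem.Str.startswith kv.1
        ("[/deployment/" ++ it.1 ++ "/" ++ p ++ "/") = true := by
      rcases hcond it hit p hpm with h | h
      · exact absurd h hsf
      · exact h
    have hnomd : ∀ q ∈ (PySem.Dict.ofList dd).items, ¬ PySem.Str.startswith q.1
        ("[/deployment/" ++ it.1 ++ "/" ++ p ++ "/") = true := by
      refine pvItems_foldl_insert _ dd PySem.Dict.empty
        (fun q hq => absurd hq (by simp [PySem.Dict.empty])) ?_
      intro q hq
      exact hnoml q hq
    have hA : pvA_procEntries (PySem.Dict.ofList dd) it.1 p = [] := by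
      refine pvA_proc_empty _ _ _ ?_
      intro k hk
      simp only [PySem.Dict.keys] at hk
      obtain ⟨q, hq, rfl⟩ := List.mem_map.mp hk
      exact hnomd q hq
    have hB : pvB_procEntries (pvB_groups (PySem.Dict.ofList dd).items) it.1 p = [] := by
      refine pvB_proc_empty _ _ _ ?_
      by_contra hct
      rw [Bool.not_eq_false] at hct
      have hk := (PySem.Dict.contains_iff_mem_keys _ _).mp hct
      exact hsf (pvGroups_keys_free _ _ hk)
    rw [hA, hB]
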